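-- pv_equiv track=rewrite | github.com/jkwiecien765/WernerTomography2 | myPackage/my_module.py | hist_convolution
-- ===== SOURCE A (Python) =====
-- def hist_convolution(binsf,binsg):
--     if(len(binsf)!=len(binsg)):
--         raise ValueError("Unmatched bins set! (different lengths)")
--     l=len(binsf)
--     conv_bins=[]
--     for i in range(l):
--         conv=0
--         for j in range(i+1):
--             conv+=binsf[i-j]*binsg[j]*l
--         conv_bins.append(conv)
--     return conv_bins
-- ===== SOURCE B (Python) =====
-- def hist_convolution(binsf, binsg):
--     if len(binsf) != len(binsg):
--         raise ValueError("Unmatched bins set! (different lengths)")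
--     l = len(binsf)
--     # Horner's scheme for the truncated polynomial product:
--     # acc <- x*acc + a*binsg  (mod x^l), folding over binsf back-to-front.
--     acc = [0] * l
--     for a in reversed(binsf):
--         acc = [a * gk + pk for gk, pk in zip(binsg, [0] + acc[:l - 1])]
--     return [c * l for c in acc]
-- ===== Notes on version B (the rewrite author's own statement) =====
-- stated objective: alternative
-- what changed: Replaced the per-index gather double loop by Horner's scheme for the truncated polynomial product: a fold over binsf back-to-front that shifts the whole accumulator vector and adds a scaled copy of binsg via zip/map, scaling by l once at the end.
import Mathlib
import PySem

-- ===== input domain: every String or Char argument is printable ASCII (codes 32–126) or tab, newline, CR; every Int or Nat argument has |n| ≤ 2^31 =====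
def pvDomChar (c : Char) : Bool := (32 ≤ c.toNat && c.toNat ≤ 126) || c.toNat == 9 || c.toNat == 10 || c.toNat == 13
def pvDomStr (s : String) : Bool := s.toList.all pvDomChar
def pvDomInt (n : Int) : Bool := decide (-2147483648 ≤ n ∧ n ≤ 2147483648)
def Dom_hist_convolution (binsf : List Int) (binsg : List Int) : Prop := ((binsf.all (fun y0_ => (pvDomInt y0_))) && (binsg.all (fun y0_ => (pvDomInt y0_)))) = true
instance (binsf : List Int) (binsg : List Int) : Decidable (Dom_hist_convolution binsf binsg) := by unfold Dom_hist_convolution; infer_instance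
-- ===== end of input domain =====

-- B replaces A's per-index double loop by Horner's scheme for the truncated polynomial
-- product: fold over binsf back-to-front, each step shifting the whole accumulator vector
-- and adding a scaled copy of binsg, then scale by l once — an alternative algorithm of the
-- same cost built from whole-list zip/map operations instead of index arithmetic.


-- ===== PORT A =====
-- literal port of A: for i in range(l): conv = 0; for j in range(i+1): conv += binsf[i-j]*binsg[j]*l; append.
-- every index access is in range (0 ≤ i-j ≤ i < l and 0 ≤ j ≤ i < l), so pyGetD with default 0 is exact.
def hist_convolution (binsf : List Int) (binsg : List Int) : List Int :=
  let l : Int := binsf.length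
  (PySem.List.pyRange 0 l 1).foldl
    (fun conv_bins i =>
      conv_bins ++ [(PySem.List.pyRange 0 (i + 1) 1).foldl
        (fun conv j => conv + PySem.List.pyGetD binsf (i - j) 0 * PySem.List.pyGetD binsg j 0 * l) 0])
    []

-- ===== PORT B =====
-- literal port of Source B: acc = [0]*l; for a in reversed(binsf): acc = [a*gk + pk for gk, pk in zip(binsg, [0] + acc[:l-1])];
-- return [c*l for c in acc].  acc[:l-1] = List.take (l-1) acc exactly: l-1 is the Nat l-1 when l ≥ 1,
-- and when l = 0 Python's acc[:-1] on the empty acc is [] = take 0 acc.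
def hist_convolution_alt (binsf : List Int) (binsg : List Int) : List Int :=
  let l := binsf.length
  let acc := binsf.reverse.foldl
    (fun acc a => (binsg.zip ((0 : Int) :: acc.take (l - 1))).map (fun p => a * p.1 + p.2))
    (List.replicate l (0 : Int))
  acc.map (fun c => c * (l : Int))

-- ===== PRECONDITION & SPEC =====
-- Pre_ excludes exactly the inputs on which the Python A raises ValueError (length mismatch).
def Pre_hist_convolution (binsf : List Int) (binsg : List Int) : Prop := binsf.length = binsg.length
instance (binsf : List Int) (binsg : List Int) : Decidable (Pre_hist_convolution binsf binsg) := by unfold Pre_hist_convolution; infer_instance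
def pvWitness_hist_convolution : List Int × List Int := ([1, -2, 3], [0, 4, 5])

def Spec_hist_convolution (binsf : List Int) (binsg : List Int) (out : List Int) : Prop := out = hist_convolution_alt binsf binsg
instance (binsf : List Int) (binsg : List Int) (out : List Int) : Decidable (Spec_hist_convolution binsf binsg out) := by unfold Spec_hist_convolution; infer_instance

-- ===== CLAIM (what is proved, stated in full; the proofs are below) =====
def Claim_equal_hist_convolution : Prop := ∀ (binsf : List Int) (binsg : List Int), Dom_hist_convolution binsf binsg → Pre_hist_convolution binsf binsg → Spec_hist_convolution binsf binsg (hist_convolution binsf binsg)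

-- ===== LEMMAS AND PROOFS =====

-- the common closed form: entry i is Σ_{j ≤ i} binsf[i-j] * binsg[j] * l
def convForm (f g : List Int) : List Int :=
  (List.range f.length).map
    (fun i => ((List.range (i + 1)).map
      (fun j => f.getD (i - j) 0 * g.getD j 0 * (f.length : Int))).sum)

theorem A_eq_convForm (f g : List Int) : hist_convolution f g = convForm f g := by
  unfold hist_convolution convForm
  dsimp only
  rw [PySem.List.pyRange_zero_nat, List.foldl_map, PySem.List.foldl_append_singleton_eq_map,
      List.nil_append]
  refine List.map_congr_left ?_
  intro i _
  have h : ((i : Int) + 1) = ((i + 1 : Nat) : Int) := by push_cast; ring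
  rw [h, PySem.List.pyRange_zero_nat, List.foldl_map, PySem.List.foldl_add, zero_add]
  refine congrArg List.sum (List.map_congr_left ?_)
  intro j hj
  have hji : j ≤ i := by simpa [Nat.lt_succ_iff] using List.mem_range.mp hj
  have h2 : (i : Int) - (j : Int) = ((i - j : Nat) : Int) := by omega
  rw [h2, PySem.List.pyGetD_natCast, PySem.List.pyGetD_natCast]

-- B's fold in foldr form (foldl over the reversed list = foldr)
def hornerB (g : List Int) (l : Nat) (f : List Int) : List Int :=
  f.foldr (fun a acc => (g.zip ((0 : Int) :: acc.take (l - 1))).map (fun p => a * p.1 + p.2))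
    (List.replicate l (0 : Int))

theorem len_hornerB (g : List Int) (l : Nat) (hg : g.length = l) (f : List Int) :
    (hornerB g l f).length = l := by
  induction f with
  | nil => simp [hornerB]
  | cons a f ih =>
    unfold hornerB at ih ⊢
    simp only [List.foldr_cons, List.length_map, List.length_zip, List.length_cons,
      List.length_take, ih, hg]
    omega

-- each entry of the Horner accumulator: Σ_{t < min (i+1) |f|} f[t] * g[i-t]
theorem getD_hornerB (g : List Int) (l : Nat) (hg : g.length = l) (f : List Int)
    (i : Nat) (hi : i < l) :
    (hornerB g l f).getD i 0 =
      ((List.range (min (i + 1) f.length)).map (fun t => f.getD t 0 * g.getD (i - t) 0)).sum := by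
  induction f generalizing i with
  | nil => simp [hornerB, List.getD_eq_getElem?_getD, hi]
  | cons a f ih =>
    have hlen : (hornerB g l f).length = l := len_hornerB g l hg f
    unfold hornerB
    simp only [List.foldr_cons]
    rw [show f.foldr (fun a acc => (g.zip ((0 : Int) :: acc.take (l - 1))).map
          (fun p => a * p.1 + p.2)) (List.replicate l (0 : Int)) = hornerB g l f from rfl]
    have hzl : ((0 : Int) :: (hornerB g l f).take (l - 1)).length = l := by
      simp [hlen]; omega
    have hig : i < g.length := by omega
    have hiz : i < ((0 : Int) :: (hornerB g l f).take (l - 1)).length := by omega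
    rw [List.getD_eq_getElem _ 0 (by simp [hg, hzl]; omega)]
    rw [List.getElem_map, List.getElem_zip]
    have hsplit : min (i + 1) (a :: f).length = min i f.length + 1 := by
      simp only [List.length_cons]; omega
    rw [hsplit, List.range_succ_eq_map, List.map_cons, List.sum_cons]
    simp only [Nat.sub_zero, List.getD_cons_zero, List.map_map]
    congr 1
    · rw [← List.getD_eq_getElem _ 0 hig]
    · -- second component: (0 :: take)[i] = if i = 0 then 0 else hornerB[i-1]
      cases i with
      | zero => simp
      | succ i =>
        have h1 : i < l - 1 := by omega
        rw [List.getElem_cons_succ, List.getElem_take, ← List.getD_eq_getElem _ 0 (by omega)]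
        rw [ih i (by omega)]
        refine congrArg List.sum (List.map_congr_left ?_)
        intro t ht
        simp only [Function.comp]
        have h2 : i + 1 - (t + 1) = i - t := by omega
        rw [h2]
        simp

-- bridge: List.range sums as Finset.range sums
theorem list_sum_range_eq (h : Nat → Int) (n : Nat) :
    ((List.range n).map h).sum = ∑ j ∈ Finset.range n, h j := by
  induction n with
  | zero => rfl
  | succ n ih =>
    rw [List.range_succ, List.map_append, List.sum_append, Finset.sum_range_succ, ih]
    simp

-- reindexing j ↦ n-1-j : the gather sum equals the Horner sum
theorem sum_reflect (h : Nat → Int) (n : Nat) :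
    ((List.range n).map (fun j => h j)).sum = ((List.range n).map (fun t => h (n - 1 - t))).sum := by
  rw [list_sum_range_eq, list_sum_range_eq]
  exact (Finset.sum_range_reflect h n).symm

theorem alt_eq_convForm (f g : List Int) (hlen : f.length = g.length) :
    hist_convolution_alt f g = convForm f g := by
  unfold hist_convolution_alt
  dsimp only
  rw [List.foldl_reverse]
  rw [show f.foldr (fun a acc => (g.zip ((0 : Int) :: acc.take (f.length - 1))).map
        (fun p => a * p.1 + p.2)) (List.replicate f.length (0 : Int)) = hornerB g f.length f
      from rfl]
  apply List.ext_getElem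
  · simp [len_hornerB g f.length hlen.symm f, convForm]
  · intro i h1 h2
    have hi : i < f.length := by
      simpa [len_hornerB g f.length hlen.symm f] using h1
    rw [List.getElem_map, ← List.getD_eq_getElem _ 0 (by rw [len_hornerB g f.length hlen.symm f]; exact hi),
        getD_hornerB g f.length hlen.symm f i hi]
    have hmin : min (i + 1) f.length = i + 1 := by omega
    rw [hmin]
    unfold convForm
    rw [List.getElem_map, List.getElem_range]
    rw [sum_reflect (fun j => f.getD (i - j) 0 * g.getD j 0 * (f.length : Int)) (i + 1)]
    rw [← List.sum_map_mul_right]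
    refine congrArg List.sum (List.map_congr_left ?_)
    intro t ht
    have htle : t ≤ i := by simpa [Nat.lt_succ_iff] using List.mem_range.mp ht
    have h3 : i + 1 - 1 - t = i - t := by omega
    have h4 : i - (i - t) = t := by omega
    rw [h3, h4]

-- ===== VERDICT (by name: the statement is the Claim_ definition above) =====
theorem hist_convolution_spec : Claim_equal_hist_convolution := by
  intro binsf binsg _ hpre
  unfold Spec_hist_convolution
  rw [A_eq_convForm, alt_eq_convForm _ _ hpre]
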